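-- pv_equiv track=rewrite | github.com/abstractdonut/acquisition | modules/board.py | intermediates
-- ===== SOURCE A (Python) =====
-- def intermediates(move):
--     fx, fy = move['from pos']
--     tx, ty = move['to pos']
--     if fx == tx and fy != ty:
--         ys = range(min(fy, ty) + 1, max(fy, ty))
--         return [(fx, y) for y in ys]
--     elif fy == ty and fx != tx:
--         xs = range(min(fx, tx) + 1, max(fx, tx))
--         return [(x, fy) for x in xs]
--     else:
--         raise ValueError
-- ===== SOURCE B (Python) =====
-- def intermediates(move):
--     fx, fy = move['from pos']
--     tx, ty = move['to pos']
--     if (fx == tx) == (fy == ty):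
--         raise ValueError
--     points = []
--     for x in range(min(fx, tx), max(fx, tx) + 1):
--         for y in range(min(fy, ty), max(fy, ty) + 1):
--             points.append((x, y))
--     return points[1:-1]
-- ===== Notes on version B (the rewrite author's own statement) =====
-- stated objective: simpler
-- what changed: Replaces A's two symmetric per-axis branches by a single xor-style guard plus one nested loop building the inclusive rectangle of cells (a straight line, since one axis range is a singleton) and returning points[1:-1].
import Mathlib
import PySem

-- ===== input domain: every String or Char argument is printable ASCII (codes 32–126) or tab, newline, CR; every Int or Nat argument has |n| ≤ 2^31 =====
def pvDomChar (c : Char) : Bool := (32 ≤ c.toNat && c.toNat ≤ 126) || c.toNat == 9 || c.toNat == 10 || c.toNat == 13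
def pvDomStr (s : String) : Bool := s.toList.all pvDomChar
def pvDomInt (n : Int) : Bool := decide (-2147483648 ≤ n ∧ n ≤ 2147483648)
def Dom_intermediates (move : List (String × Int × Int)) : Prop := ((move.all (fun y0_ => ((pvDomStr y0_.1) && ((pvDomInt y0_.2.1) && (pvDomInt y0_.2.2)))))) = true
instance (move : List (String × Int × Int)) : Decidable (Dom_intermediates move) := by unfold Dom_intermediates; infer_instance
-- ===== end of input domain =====

-- B replaces A's two symmetric per-axis branches by one guard plus a nested inclusive
-- rectangle scan sliced by points[1:-1] (objective: simpler decomposition, same cost).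

-- ===== PORT A =====
def intermediates (move : List (String × Int × Int)) : List (Int × Int) :=
  match (PySem.Dict.mk move).get? "from pos", (PySem.Dict.mk move).get? "to pos" with
  | some (fx, fy), some (tx, ty) =>
      if fx = tx ∧ fy ≠ ty then
        (PySem.List.pyRange (min fy ty + 1) (max fy ty) 1).map (fun y => (fx, y))
      else if fy = ty ∧ fx ≠ tx then
        (PySem.List.pyRange (min fx tx + 1) (max fx tx) 1).map (fun x => (x, fy))
      else []   -- Python: raise ValueError (excluded by Pre_)
  | _, _ => []  -- Python: KeyError (excluded by Pre_)

-- ===== PORT B =====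
def intermediates_alt (move : List (String × Int × Int)) : List (Int × Int) :=
  match (PySem.Dict.mk move).get? "from pos" with
  | none => []  -- Python: KeyError (excluded by Pre_)
  | some (fx, fy) =>
    match (PySem.Dict.mk move).get? "to pos" with
    | none => []  -- Python: KeyError (excluded by Pre_)
    | some (tx, ty) =>
      if ((fx == tx) == (fy == ty) : Bool) then []   -- Python: raise ValueError (excluded by Pre_)
      else
        let points := (PySem.List.pyRange (min fx tx) (max fx tx + 1) 1).flatMap
          (fun x => (PySem.List.pyRange (min fy ty) (max fy ty + 1) 1).map (fun y => (x, y)))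
        PySem.List.slice points (some 1) (some (-1))

-- ===== PRECONDITION & SPEC =====
def preB_intermediates (move : List (String × Int × Int)) : Bool :=
  match (PySem.Dict.mk move).get? "from pos" with
  | none => false
  | some (fx, fy) =>
    match (PySem.Dict.mk move).get? "to pos" with
    | none => false
    | some (tx, ty) => (fx == tx) != (fy == ty)

-- Pre_ excludes inputs where A raises: a missing 'from pos'/'to pos' key (KeyError) and
-- moves that are diagonal or have equal endpoints (ValueError).
def Pre_intermediates (move : List (String × Int × Int)) : Prop := preB_intermediates move = true
instance (move : List (String × Int × Int)) : Decidable (Pre_intermediates move) := by unfold Pre_intermediates; infer_instance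

def pvWitness_intermediates : (List (String × Int × Int)) := [("from pos", 0, 0), ("to pos", 0, 3)]

def Spec_intermediates (move : List (String × Int × Int)) (out : List (Int × Int)) : Prop := out = intermediates_alt move
instance (move : List (String × Int × Int)) (out : List (Int × Int)) : Decidable (Spec_intermediates move out) := by unfold Spec_intermediates; infer_instance

-- ===== CLAIM (what is proved, stated in full; the proofs are below) =====
def Claim_equal_intermediates : Prop := ∀ (move : List (String × Int × Int)), Dom_intermediates move → Pre_intermediates move → Spec_intermediates move (intermediates move)

-- ===== LEMMAS AND PROOFS =====

-- stripping the two endpoints of an inclusive line equals A's open range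
lemma slice_map_range (f : Int → Int × Int) (a b : Int) (h : a < b) :
    PySem.List.slice ((PySem.List.pyRange a (b + 1) 1).map f) (some 1) (some (-1))
      = (PySem.List.pyRange (a + 1) b 1).map f := by
  rw [PySem.List.pyRange_one_cons (by omega : a < b + 1),
      PySem.List.pyRange_one_succ_right (by omega : a + 1 ≤ b)]
  simp only [List.map_cons, List.map_append, List.map_cons, List.map_nil]
  simp [PySem.List.slice, PySem.List.clampIdx]
  rw [if_neg (by omega), List.take_append_of_le_length (by simp)]
  simp

-- ===== VERDICT (by name: the statement is the Claim_ definition above) =====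
theorem intermediates_spec : Claim_equal_intermediates := by
  intro move _ hpre
  unfold Spec_intermediates intermediates intermediates_alt
  unfold Pre_intermediates preB_intermediates at hpre
  cases hf : (PySem.Dict.mk move).get? "from pos" with
  | none => simp [hf] at hpre
  | some p =>
    cases hg : (PySem.Dict.mk move).get? "to pos" with
    | none => simp [hf, hg] at hpre
    | some q =>
      obtain ⟨fx, fy⟩ := p; obtain ⟨tx, ty⟩ := q
      simp only [hf, hg] at hpre ⊢
      by_cases hx : fx = tx
      · by_cases hy : fy = ty
        · simp [hx, hy] at hpre
        · -- vertical
          subst hx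
          rw [if_pos ⟨rfl, hy⟩]
          simp only [beq_self_eq_true, min_self, max_self,
            PySem.List.pyRange_one_singleton, List.flatMap_singleton]
          rw [if_neg (by simp [hy]), slice_map_range _ _ _ (by omega : min fy ty < max fy ty)]
      · by_cases hy : fy = ty
        · -- horizontal
          subst hy
          rw [if_neg (fun h => hx h.1), if_pos ⟨rfl, hx⟩]
          simp only [beq_self_eq_true, min_self, max_self,
            PySem.List.pyRange_one_singleton, List.map_singleton]
          rw [if_neg (by simp [hx]),
            show List.flatMap (fun x => [(x, fy)]) (PySem.List.pyRange (min fx tx) (max fx tx + 1) 1)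
                = (PySem.List.pyRange (min fx tx) (max fx tx + 1) 1).map (fun x => (x, fy)) by
              induction PySem.List.pyRange (min fx tx) (max fx tx + 1) 1 with
              | nil => rfl
              | cons h t ih => simp [List.flatMap] at ih ⊢; exact ih,
            slice_map_range _ _ _ (by omega : min fx tx < max fx tx)]
        · simp [hx, hy] at hpre
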